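-- pv_equiv track=rewrite | github.com/aisands/mathemagic | sample_python/CodeEval challenges/rightmostChar.py | rightmostChar
-- ===== SOURCE A (Python) =====
-- def rightmostChar(line):
--     str,let = line.split(',')
--     indices = list(range(len(str)))
--     indices.reverse()
--     for i in indices:
--         if str[i] == let:
--             return i
--     return -1
-- ===== SOURCE B (Python) =====
-- def rightmostChar(line):
--     str, let = line.split(',')
--     result = -1
--     for i, ch in enumerate(str):
--         if ch == let:
--             result = i
--     return result
-- ===== Notes on version B (the rewrite author's own statement) =====
-- stated objective: alternative
-- what changed: Replaces the reversed-range scan with early return by a single forward enumerate pass that keeps the last matching index in an accumulator.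
import Mathlib
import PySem

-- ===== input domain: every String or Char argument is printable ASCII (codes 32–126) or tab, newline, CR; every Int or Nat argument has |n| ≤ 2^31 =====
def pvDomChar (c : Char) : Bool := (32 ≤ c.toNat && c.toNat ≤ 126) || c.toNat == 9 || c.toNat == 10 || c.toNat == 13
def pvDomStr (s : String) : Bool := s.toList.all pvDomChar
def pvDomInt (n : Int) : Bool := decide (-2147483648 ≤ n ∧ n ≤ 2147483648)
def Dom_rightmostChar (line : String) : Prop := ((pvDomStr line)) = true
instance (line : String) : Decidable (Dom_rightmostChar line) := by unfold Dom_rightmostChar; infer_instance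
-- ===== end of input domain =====

-- B changes only the traversal: a forward pass with a last-match accumulator instead of A's
-- reverse scan with early return; return value only, same cost.

-- ===== PORT A =====
-- the reversed-indices loop returning the first hit, -1 after the loop
-- (str[i] is the 1-char string [c]; 'let' may have any length).
def pvGoA (cs lcs : List Char) : List Nat → Int
  | [] => -1
  | i :: rest => if cs[i]?.map (fun c => [c]) = some lcs then (i : Int) else pvGoA cs lcs rest

def rightmostChar (line : String) : Int :=
  match PySem.Str.split? line "," with
  | some [s, l] => pvGoA s.toList l.toList (List.range s.toList.length).reverse
  | _ => -1  -- unreachable inside Pre_ (Python raises ValueError on unpacking)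

-- ===== PORT B =====
def rightmostChar_alt (line : String) : Int :=
  let parts := (PySem.Str.split? line ",").getD []
  if parts.length = 2 then
    let s := parts.getD 0 ""
    let l := parts.getD 1 ""
    (PySem.List.enumerate s.toList).foldl
      (fun r (p : Int × Char) => if [p.2] = l.toList then p.1 else r) (-1)
  else -1  -- unreachable inside Pre_ (Python raises ValueError on unpacking)

-- ===== PRECONDITION & SPEC =====
-- Pre_ excludes exactly the inputs where A's two-variable unpacking of the split raises
-- ValueError (line does not contain exactly one comma); A returns on every other input.
def Pre_rightmostChar (line : String) : Prop := ((PySem.Str.split? line ",").getD []).length = 2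
instance (line : String) : Decidable (Pre_rightmostChar line) := by unfold Pre_rightmostChar; infer_instance
def pvWitness_rightmostChar : String := "hello,l"

def Spec_rightmostChar (line : String) (out : Int) : Prop := out = rightmostChar_alt line
instance (line : String) (out : Int) : Decidable (Spec_rightmostChar line out) := by unfold Spec_rightmostChar; infer_instance

-- ===== CLAIM (what is proved, stated in full; the proofs are below) =====
def Claim_equal_rightmostChar : Prop := ∀ (line : String), Dom_rightmostChar line → Pre_rightmostChar line → Spec_rightmostChar line (rightmostChar line)

-- ===== LEMMAS AND PROOFS =====

-- pvGoA only looks at cs[i]? for i in the index list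
theorem pvGoA_congr (cs cs' lcs : List Char) (idxs : List Nat)
    (h : ∀ i ∈ idxs, cs[i]? = cs'[i]?) : pvGoA cs lcs idxs = pvGoA cs' lcs idxs := by
  induction idxs with
  | nil => rfl
  | cons i rest ih =>
    simp only [pvGoA, h i (by simp)]
    exact if_congr Iff.rfl rfl (ih fun j hj => h j (by simp [hj]))

-- the reverse early-return scan equals the forward last-match fold
theorem goA_eq_fold (lcs : List Char) (cs : List Char) :
    pvGoA cs lcs (List.range cs.length).reverse
      = (PySem.List.enumerate cs).foldl (fun r (p : Int × Char) => if [p.2] = lcs then p.1 else r) (-1) := by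
  induction cs using List.reverseRecOn with
  | nil => rfl
  | append_singleton cs c ih =>
    have hlen : (cs ++ [c]).length = cs.length + 1 := by simp
    rw [hlen, List.range_succ, List.reverse_append]
    simp only [List.reverse_singleton, List.singleton_append, pvGoA]
    have hget : (cs ++ [c])[cs.length]? = some c := by simp
    rw [PySem.List.enumerate_append]
    simp only [List.foldl_append, PySem.List.enumerate_cons, PySem.List.enumerate_nil,
      List.foldl_cons, List.foldl_nil, hget, Option.map_some]
    have hcongr : pvGoA (cs ++ [c]) lcs (List.range cs.length).reverse
        = pvGoA cs lcs (List.range cs.length).reverse := by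
      refine pvGoA_congr _ _ _ _ fun i hi => ?_
      have : i < cs.length := by simpa using hi
      simp [List.getElem?_append_left this]
    by_cases h : [c] = lcs
    · simp [h]
    · have : ¬ (some [c] = some lcs) := by simpa using h
      rw [if_neg this, if_neg h, hcongr, ih]

-- ===== VERDICT (by name: the statement is the Claim_ definition above) =====
theorem rightmostChar_spec : Claim_equal_rightmostChar := by
  intro line _ _
  unfold Spec_rightmostChar rightmostChar rightmostChar_alt
  cases h : PySem.Str.split? line "," with
  | none => rfl
  | some parts =>
    match parts with
    | [] => rfl
    | [_] => rfl
    | [s, l] => simpa using goA_eq_fold l.toList s.toList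
    | _ :: _ :: _ :: _ => simp
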